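-- pv_equiv track=rewrite | github.com/tani-s/337-project-2 | helper.py | get_after_prefix
-- ===== SOURCE A (Python) =====
-- def get_after_prefix(paragraph, phrases):
--     post = set()
--     for p in phrases:
--         for i in range(len(paragraph)):
--             if p[0] == paragraph[i]:
--                 match = True
--                 L = len(p)
--                 if i+L < len(paragraph):
--                     for k in range(1,L):
--                         w1 = p[k]
--                         w2 = paragraph[i+k]
--                         if p[k] != paragraph[i+k]:
--                             match = False
--                             break
--                     if match:
--                         post.add(paragraph[i+L])
--     return post
-- ===== SOURCE B (Python) =====
-- def get_after_prefix(paragraph, phrases):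
--     # inverted index: word -> list of positions where it occurs (ascending)
--     index = {}
--     for i, w in enumerate(paragraph):
--         index.setdefault(w, []).append(i)
--     n = len(paragraph)
--     post = set()
--     for p in phrases:
--         L = len(p)
--         for i in index.get(p[0], []):
--             if i + L < n and paragraph[i:i+L] == p:
--                 post.add(paragraph[i+L])
--     return post
-- ===== Notes on version B (the rewrite author's own statement) =====
-- stated objective: faster
-- what changed: B builds an inverted index (word -> positions) in one pass and, per phrase, only visits the positions of its first word, comparing the candidate window by a single slice equality instead of A's scan of every paragraph position with an inner word-by-word loop.
-- outside the precondition, e.g. on get_after_prefix([], [[]]): A returns set(), B raises IndexError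
import Mathlib
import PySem

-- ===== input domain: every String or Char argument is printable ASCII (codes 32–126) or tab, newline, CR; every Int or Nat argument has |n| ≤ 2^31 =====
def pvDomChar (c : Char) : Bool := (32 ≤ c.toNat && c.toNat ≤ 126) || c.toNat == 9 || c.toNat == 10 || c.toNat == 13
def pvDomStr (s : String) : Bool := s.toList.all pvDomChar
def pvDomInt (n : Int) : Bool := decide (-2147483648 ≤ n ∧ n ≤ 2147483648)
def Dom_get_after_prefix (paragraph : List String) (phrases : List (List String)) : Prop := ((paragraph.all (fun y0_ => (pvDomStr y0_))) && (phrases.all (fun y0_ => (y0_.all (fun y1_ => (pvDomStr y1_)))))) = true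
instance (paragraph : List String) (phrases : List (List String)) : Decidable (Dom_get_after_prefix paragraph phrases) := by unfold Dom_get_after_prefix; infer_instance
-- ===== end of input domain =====

-- B replaces A's scan of every paragraph position per phrase by a one-pass inverted index
-- (word -> occurrence positions) plus a slice comparison per candidate (objective: faster).

-- ===== PORT A =====
-- indices produced by range(len(paragraph)) / range(1, L) are always in range, so the
-- in-range accesses paragraph[i], p[k], paragraph[i+k], paragraph[i+L] are ported with getD;
-- the inner for-k loop with its break/match flag is the all-check over range(1, L).
def get_after_prefix (paragraph : List String) (phrases : List (List String)) : List String :=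
  phrases.foldl (fun post p =>
    (List.range paragraph.length).foldl (fun post i =>
      if p.getD 0 "" == paragraph.getD i "" then
        if i + p.length < paragraph.length then
          if (List.range' 1 (p.length - 1)).all (fun k => p.getD k "" == paragraph.getD (i + k) "") then
            PySem.Set.add post (paragraph.getD (i + p.length) "")
          else post
        else post
      else post) post) PySem.Set.empty

-- ===== PORT B =====
-- index.setdefault(w, []).append(i) is Dict.modify w [] (· ++ [i]); the short-circuit
-- 'and' becomes nested ifs; paragraph[i:i+L] is PySem.List.slice.
def get_after_prefix_alt (paragraph : List String) (phrases : List (List String)) : List String :=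
  let index : PySem.Dict String (List Int) :=
    (PySem.List.enumerate paragraph).foldl (fun d q => d.modify q.2 [] (· ++ [q.1])) PySem.Dict.empty
  let n : Int := paragraph.length
  phrases.foldl (fun post p =>
    let L : Int := p.length
    (index.getD (p.getD 0 "") []).foldl (fun post i =>
      if i + L < n then
        if PySem.List.slice paragraph (some i) (some (i + L)) == p then
          PySem.Set.add post (PySem.List.pyGetD paragraph (i + L) "")
        else post
      else post) post) PySem.Set.empty

-- ===== PRECONDITION & SPEC =====
-- Pre_ excludes phrase lists containing an empty phrase: there A raises IndexError at p[0]
-- whenever the paragraph is non-empty (and returns set() only accidentally when the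
-- paragraph is empty, its position loop never running); B evaluates p[0] unconditionally
-- and raises IndexError on every such input.
def Pre_get_after_prefix (paragraph : List String) (phrases : List (List String)) : Prop :=
  ∀ p ∈ phrases, p ≠ []
instance (paragraph : List String) (phrases : List (List String)) : Decidable (Pre_get_after_prefix paragraph phrases) := by unfold Pre_get_after_prefix; infer_instance
def pvWitness_get_after_prefix : List String × List (List String) :=
  (["a", "b", "c", "a", "b"], [["a", "b"], ["b"]])
def Spec_get_after_prefix (paragraph : List String) (phrases : List (List String)) (out : List String) : Prop := out = get_after_prefix_alt paragraph phrases
instance (paragraph : List String) (phrases : List (List String)) (out : List String) : Decidable (Spec_get_after_prefix paragraph phrases out) := by unfold Spec_get_after_prefix; infer_instance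

-- ===== CLAIM (what is proved, stated in full; the proofs are below) =====
def Claim_equal_get_after_prefix : Prop := ∀ (paragraph : List String) (phrases : List (List String)), Dom_get_after_prefix paragraph phrases → Pre_get_after_prefix paragraph phrases → Spec_get_after_prefix paragraph phrases (get_after_prefix paragraph phrases)

-- ===== LEMMAS AND PROOFS =====

-- the inverted index built by B lists, for each word, exactly the positions of the
-- paragraph holding that word, in ascending order (as Ints)
theorem pv_index_getD (paragraph : List String) (w : String) :
    ((PySem.List.enumerate paragraph).foldl (fun d q => d.modify q.2 [] (· ++ [q.1]))
        (PySem.Dict.empty : PySem.Dict String (List Int))).getD w []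
      = ((List.range paragraph.length).filter
          (fun i => paragraph.getD i "" == w)).map (fun (i : Nat) => (i : Int)) := by
  have h1 : (PySem.List.enumerate paragraph).foldl (fun d q => d.modify q.2 [] (· ++ [q.1]))
        (PySem.Dict.empty : PySem.Dict String (List Int))
      = ((PySem.List.enumerate paragraph).map Prod.swap).foldl
          (fun d q => d.modify q.1 [] (· ++ [q.2])) PySem.Dict.empty := by
    rw [List.foldl_map]; simp
  rw [h1, PySem.Dict.getD_foldl_modify_append]
  rw [PySem.List.enumerate_eq_map_pyRange (d := "")]
  simp only [PySem.List.len_eq]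
  rw [PySem.List.pyRange_zero_natCast]
  simp [Function.comp_def, PySem.List.pyGetD_natCast, List.getD, List.filter_map]

-- a window equality by slice is the same test as A's head-guard + word-by-word loop
theorem pv_window_eq (paragraph p : List String) (i : Nat)
    (hp : p ≠ []) (hi : i + p.length < paragraph.length)
    (h0 : paragraph.getD i "" = p.getD 0 "") :
    ((paragraph.drop i).take p.length == p)
      = (List.range' 1 (p.length - 1)).all
          (fun k => p.getD k "" == paragraph.getD (i + k) "") := by
  have hL : 0 < p.length := List.length_pos_iff.mpr hp
  have hlen : ((paragraph.drop i).take p.length).length = p.length := by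
    simp [List.length_take, List.length_drop]; omega
  rw [Bool.eq_iff_iff]
  simp only [beq_iff_eq, List.all_eq_true, List.mem_range'_1]
  constructor
  · rintro h k ⟨hk1, hk2⟩
    have hkL : k < p.length := by omega
    have hik : i + k < paragraph.length := by omega
    rw [List.getD_eq_getElem _ _ hkL, List.getD_eq_getElem _ _ hik]
    have := List.ext_getElem_iff.mp h |>.2
    have h2 := this k (by omega) (by omega)
    simpa using h2.symm
  · intro h
    apply List.ext_getElem hlen
    intro k hk1 hk2
    have hik : i + k < paragraph.length := by omega
    simp only [List.getElem_take, List.getElem_drop]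
    rcases Nat.eq_zero_or_pos k with rfl | hk0
    · have := h0
      rw [List.getD_eq_getElem _ _ (by omega : i < paragraph.length),
          List.getD_eq_getElem _ _ hL] at this
      simpa using this
    · have h2 := h k ⟨by omega, by omega⟩
      rw [List.getD_eq_getElem _ _ hk2, List.getD_eq_getElem _ _ hik] at h2
      exact h2.symm

-- per phrase, B's fold over the indexed positions equals A's fold over all positions
theorem pv_inner (paragraph : List String) (p : List String) (hp : p ≠ []) (post : List String) :
    (((PySem.List.enumerate paragraph).foldl (fun d q => d.modify q.2 [] (· ++ [q.1]))
        (PySem.Dict.empty : PySem.Dict String (List Int))).getD (p.getD 0 "") []).foldl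
      (fun post i =>
        if i + (p.length : Int) < (paragraph.length : Int) then
          if PySem.List.slice paragraph (some i) (some (i + (p.length : Int))) == p then
            PySem.Set.add post (PySem.List.pyGetD paragraph (i + (p.length : Int)) "")
          else post
        else post) post
    = (List.range paragraph.length).foldl (fun post i =>
        if p.getD 0 "" == paragraph.getD i "" then
          if i + p.length < paragraph.length then
            if (List.range' 1 (p.length - 1)).all (fun k => p.getD k "" == paragraph.getD (i + k) "") then
              PySem.Set.add post (paragraph.getD (i + p.length) "")
            else post
          else post
        else post) post := by
  rw [pv_index_getD, List.foldl_map]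
  rw [PySem.List.foldl_if_eq_foldl_filter
        (p := fun i => p.getD 0 "" == paragraph.getD i "")]
  have hf : (List.range paragraph.length).filter (fun i => p.getD 0 "" == paragraph.getD i "")
      = (List.range paragraph.length).filter (fun i => paragraph.getD i "" == p.getD 0 "") := by
    apply List.filter_congr; intro x _; simp [eq_comm]
  rw [← hf]
  apply PySem.List.foldl_congr_mem
  intro acc i hmem
  have hi : i < paragraph.length := List.mem_range.mp (List.mem_filter.mp hmem).1
  have h0 : paragraph.getD i "" = p.getD 0 "" :=
    (beq_iff_eq.mp (List.mem_filter.mp hmem).2).symm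
  by_cases hlt : i + p.length < paragraph.length
  · have hltI : ((i : Int) + (p.length : Int) < (paragraph.length : Int)) := by exact_mod_cast hlt
    rw [if_pos hltI, if_pos hlt]
    rw [PySem.List.slice_natCast_add]
    rw [pv_window_eq paragraph p i hp hlt h0]
    have hcast : ((i : Int) + (p.length : Int)) = ((i + p.length : Nat) : Int) := by push_cast; ring
    rw [hcast, PySem.List.pyGetD_natCast]
  · have hltI : ¬ ((i : Int) + (p.length : Int) < (paragraph.length : Int)) := by
      intro h; exact hlt (by exact_mod_cast h)
    rw [if_neg hltI, if_neg hlt]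

-- the two phrase-level folds agree whenever every phrase is non-empty
theorem pv_outer (paragraph : List String) (phrases : List (List String))
    (hpre : ∀ p ∈ phrases, p ≠ []) : ∀ post : List String,
    phrases.foldl (fun post p =>
      (List.range paragraph.length).foldl (fun post i =>
        if p.getD 0 "" == paragraph.getD i "" then
          if i + p.length < paragraph.length then
            if (List.range' 1 (p.length - 1)).all (fun k => p.getD k "" == paragraph.getD (i + k) "") then
              PySem.Set.add post (paragraph.getD (i + p.length) "")
            else post
          else post
        else post) post) post
    = phrases.foldl (fun post p =>
      ((((PySem.List.enumerate paragraph).foldl (fun d q => d.modify q.2 [] (· ++ [q.1]))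
          (PySem.Dict.empty : PySem.Dict String (List Int))).getD (p.getD 0 "") []).foldl
        (fun post i =>
          if i + (p.length : Int) < (paragraph.length : Int) then
            if PySem.List.slice paragraph (some i) (some (i + (p.length : Int))) == p then
              PySem.Set.add post (PySem.List.pyGetD paragraph (i + (p.length : Int)) "")
            else post
          else post) post)) post := by
  induction phrases with
  | nil => intro post; rfl
  | cons p ps ih =>
      intro post
      simp only [List.foldl_cons]
      rw [pv_inner paragraph p (hpre p (List.mem_cons_self)) post]
      exact ih (fun q hq => hpre q (List.mem_cons_of_mem _ hq)) _

-- ===== VERDICT (by name: the statement is the Claim_ definition above) =====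
theorem get_after_prefix_spec : Claim_equal_get_after_prefix := by
  intro paragraph phrases _ hpre
  unfold Spec_get_after_prefix get_after_prefix get_after_prefix_alt
  exact pv_outer paragraph phrases hpre PySem.Set.empty
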